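-- pv_equiv track=rewrite | github.com/XenoPXD/CMD | py/hangman.py | getNbrErrors
-- ===== SOURCE A (Python) =====
-- def replaceAll(string, old, new):
--     string2 = string
--     for c in string:
--         string2 = string.replace(old, new)
--         string=string2
--     return string
--
-- def getNbrErrors(word, chars):
--     counter=0
--     for cc in chars:
--         trouve=True
--         if cc != " ":
--             trouve=False
--             for cw in word:
--                 if cw.upper() == cc.upper():
--                     trouve=True
--                     word = replaceAll(word, cw, ' ')
--             if trouve==False:
--                 counter += 1
--     return counter
-- ===== SOURCE B (Python) =====
-- def getNbrErrors(word, chars):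
--     wordLetters = {c.upper() for c in word}
--     guesses = [c.upper() for c in chars if c != ' ']
--     hits = len(set(guesses) & wordLetters)
--     return len(guesses) - hits
-- ===== Notes on version B (the rewrite author's own statement) =====
-- stated objective: faster
-- what changed: A repeatedly rewrites the word inside nested loops (each matching guess triggers a full str.replace pass per word character); B never mutates the word: it counts non-space guesses and subtracts the size of the intersection of the distinct uppercased guesses with the set of uppercased word letters.
import Mathlib
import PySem

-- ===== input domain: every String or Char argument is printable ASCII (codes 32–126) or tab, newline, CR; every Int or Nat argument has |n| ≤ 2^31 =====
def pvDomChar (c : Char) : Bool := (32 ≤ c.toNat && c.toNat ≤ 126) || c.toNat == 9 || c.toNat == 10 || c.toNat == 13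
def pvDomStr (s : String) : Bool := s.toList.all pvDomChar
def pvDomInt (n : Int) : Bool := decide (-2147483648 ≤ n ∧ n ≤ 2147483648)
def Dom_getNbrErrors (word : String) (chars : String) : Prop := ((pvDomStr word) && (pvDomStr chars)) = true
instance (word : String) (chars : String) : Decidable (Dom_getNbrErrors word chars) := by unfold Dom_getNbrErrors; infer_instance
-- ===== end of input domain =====

-- B replaces A's stateful in-order removal loop over a repeatedly rewritten word by an
-- order-independent set-intersection count (distinct uppercased guesses present in the word).

-- ===== PORT A =====
-- replaceAll: string2 = string; for c in string: string2 = string.replace(old, new); string = string2; return string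
def replaceAll (string : String) (old : String) (new : String) : String :=
  (string.toList.foldl
    (fun (st : String × String) _ =>
      let string2 := PySem.Str.replace st.1 old new
      (string2, string2))
    (string, string)).1

-- body of 'for cw in word' (cw.upper() == cc.upper() on 1-char strings = upperChar equality)
def pvInnerStep (cc : Char) (p : String × Bool) (cw : Char) : String × Bool :=
  if PySem.Chars.upperChar cw = PySem.Chars.upperChar cc then
    (replaceAll p.1 (String.ofList [cw]) " ", true)
  else p

-- body of 'for cc in chars' on state (counter, word)
def pvOuterStep (st : Int × String) (cc : Char) : Int × String :=
  let counter := st.1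
  let word := st.2
  if cc ≠ ' ' then
    let r := word.toList.foldl (pvInnerStep cc) (word, false)
    if r.2 = false then (counter + 1, r.1) else (counter, r.1)
  else (counter, word)

def getNbrErrors (word : String) (chars : String) : Int :=
  (chars.toList.foldl pvOuterStep (0, word)).1

-- ===== PORT B =====
def getNbrErrors_alt (word : String) (chars : String) : Int :=
  let wordLetters : PySem.Set Char := PySem.Set.ofList (word.toList.map PySem.Chars.upperChar)
  let guesses : List Char := (chars.toList.filter (fun c => c ≠ ' ')).map PySem.Chars.upperChar
  let hits : Nat := (PySem.Set.inter (PySem.Set.ofList guesses) wordLetters).length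
  (guesses.length : Int) - (hits : Int)

-- ===== PRECONDITION & SPEC =====
def Spec_getNbrErrors (word : String) (chars : String) (out : Int) : Prop := out = getNbrErrors_alt word chars
instance (word : String) (chars : String) (out : Int) : Decidable (Spec_getNbrErrors word chars out) := by unfold Spec_getNbrErrors; infer_instance

-- ===== CLAIM (what is proved, stated in full; the proofs are below) =====
def Claim_equal_getNbrErrors : Prop := ∀ (word : String) (chars : String), Dom_getNbrErrors word chars → Spec_getNbrErrors word chars (getNbrErrors word chars)

-- ===== LEMMAS AND PROOFS =====

-- upperChar of a non-space char is not space
lemma pv_upper_ne_space (c : Char) (hc : c ≠ ' ') : PySem.Chars.upperChar c ≠ ' ' := by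
  unfold PySem.Chars.upperChar PySem.Chars.islower
  split_ifs with h
  · simp only [Bool.and_eq_true, decide_eq_true_eq] at h
    intro heq
    have h1 := h.1; have h2 := h.2
    rw [Char.le_def] at h1 h2
    have hv : (c.toNat - 32).isValidChar := by
      left; change c.toNat - 32 < 55296
      have : c.toNat ≤ 122 := h2
      omega
    have heqn : (Char.ofNat (c.toNat - 32)).toNat = (' ':Char).toNat := by rw [heq]
    rw [show ∀ (n:Nat) (h : n.isValidChar), (Char.ofNat n).toNat = n from
      fun n h => by simp [Char.ofNat, h, Char.ofNatAux, Char.toNat]] at heqn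
    · have h32 : c.toNat - 32 = 32 := heqn
      have h1' : 97 ≤ c.toNat := h1
      omega
    · exact hv
  · exact hc

-- Python str.replace with a single-char pattern is a pointwise map
lemma pv_replace_go_single (o n : Char) :
    ∀ (fuel : Nat) (l acc : List Char), l.length ≤ fuel →
      PySem.Chars.replace.go [o] [n] fuel l acc
        = acc.reverse ++ l.map (fun x => if x = o then n else x) := by
  intro fuel
  induction fuel with
  | zero =>
    intro l acc h
    have : l = [] := List.length_eq_zero_iff.mp (Nat.le_zero.mp h)
    subst this
    simp [PySem.Chars.replace.go]
  | succ f ih =>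
    intro l acc h
    cases l with
    | nil => simp [PySem.Chars.replace.go]
    | cons c t =>
      rw [PySem.Chars.replace.go]
      by_cases hc : c = o
      · subst hc
        have hp : [c].isPrefixOf (c :: t) = true := by simp [List.isPrefixOf]
        simp only [hp, if_true]
        rw [ih _ _ (by simpa using Nat.le_of_succ_le_succ h)]
        simp
      · have hp : [o].isPrefixOf (c :: t) = false := by
          simp [List.isPrefixOf]
          exact fun h' => hc h'.symm
        simp only [hp, Bool.false_eq_true, if_false]
        rw [ih _ _ (by simpa using Nat.le_of_succ_le_succ h)]
        simp [hc]

lemma pv_replace_single (s : List Char) (o n : Char) :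
    PySem.Chars.replace s [o] [n] = s.map (fun x => if x = o then n else x) := by
  rw [PySem.Chars.replace]
  simp only [List.isEmpty_cons, Bool.false_eq_true, if_false]
  simpa using pv_replace_go_single o n s.length s [] (le_refl _)

lemma pv_str_replace_single (a : String) (o n : Char) :
    PySem.Str.replace a (String.ofList [o]) (String.ofList [n])
      = String.ofList (a.toList.map (fun x => if x = o then n else x)) := by
  apply String.toList_inj.mp
  rw [PySem.Str.toList_replace]
  simp [pv_replace_single]

lemma pv_fold_rep (o n : Char) (hno : n ≠ o) :
    ∀ (l : List Char) (a : String), l ≠ [] →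
      (l.foldl (fun (st : String × String) _ =>
          let string2 := PySem.Str.replace st.1 (String.ofList [o]) (String.ofList [n])
          (string2, string2)) (a, a)).1
        = String.ofList (a.toList.map (fun x => if x = o then n else x)) := by
  intro l
  induction l with
  | nil => intro a h; exact absurd rfl h
  | cons c t ih =>
    intro a _
    simp only [List.foldl_cons]
    rw [pv_str_replace_single]
    cases t with
    | nil => simp
    | cons c' t' =>
      rw [ih _ (by simp)]
      congr 1
      simp only [String.toList_ofList, List.map_map]
      apply List.map_congr_left
      intro x _
      by_cases hx : x = o <;> simp [hx, Function.comp, hno]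

-- A's replaceAll on a nonempty string with distinct single chars is one pointwise map
lemma pv_replaceAll_single (s : String) (o n : Char) (hno : n ≠ o) (hs : s.toList ≠ []) :
    replaceAll s (String.ofList [o]) (String.ofList [n])
      = String.ofList (s.toList.map (fun x => if x = o then n else x)) := by
  unfold replaceAll
  exact pv_fold_rep o n hno s.toList s hs

-- the inner loop blanks every char case-matching cc that occurs in the iterated list, and reports a match
lemma pv_inner_fold (cc : Char) (hcc : cc ≠ ' ') :
    ∀ (t u : List Char) (b : Bool), (u ≠ [] ∨ t = []) →
      t.foldl (pvInnerStep cc) (String.ofList u, b)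
        = (String.ofList (u.map (fun x =>
              if PySem.Chars.upperChar x = PySem.Chars.upperChar cc ∧ x ∈ t then ' ' else x)),
           b || t.any (fun cw => PySem.Chars.upperChar cw == PySem.Chars.upperChar cc)) := by
  intro t
  induction t with
  | nil =>
    intro u b _
    simp
  | cons cw t ih =>
    intro u b hu
    have hu' : u ≠ [] := by
      rcases hu with h | h
      · exact h
      · exact absurd h (by simp)
    simp only [List.foldl_cons, List.any_cons]
    by_cases h : PySem.Chars.upperChar cw = PySem.Chars.upperChar cc
    · have hcw : cw ≠ ' ' := by
        intro hw
        apply pv_upper_ne_space cc hcc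
        rw [← h, hw]
        rfl
      have hstep : pvInnerStep cc (String.ofList u, b) cw
          = (String.ofList (u.map (fun x => if x = cw then ' ' else x)), true) := by
        unfold pvInnerStep
        rw [if_pos h]
        rw [show (" ":String) = String.ofList [' '] from rfl]
        rw [pv_replaceAll_single _ cw ' ' (fun hh => hcw hh.symm) (by simpa using hu')]
        simp
      rw [hstep]
      rw [ih (u.map (fun x => if x = cw then ' ' else x)) true
            (Or.inl (by simpa using hu'))]
      simp only [Prod.mk.injEq]
      refine ⟨?_, ?_⟩
      · congr 1
        rw [List.map_map]
        apply List.map_congr_left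
        intro x _
        by_cases hx : x = cw
        · subst hx
          simp [h]
        · simp only [Function.comp, if_neg hx]
          by_cases hm : PySem.Chars.upperChar x = PySem.Chars.upperChar cc ∧ x ∈ t
          · rw [if_pos hm, if_pos ⟨hm.1, List.mem_cons_of_mem _ hm.2⟩]
          · rw [if_neg hm, if_neg]
            intro ⟨h1, h2⟩
            rcases List.mem_cons.mp h2 with h3 | h3
            · exact hx h3
            · exact hm ⟨h1, h3⟩
      · simp [h]
    · rw [show pvInnerStep cc (String.ofList u, b) cw = (String.ofList u, b) from by
        unfold pvInnerStep; rw [if_neg h]]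
      rw [ih u b (Or.inl hu')]
      simp only [Prod.mk.injEq]
      refine ⟨?_, ?_⟩
      · congr 1
        apply List.map_congr_left
        intro x _
        by_cases hm : PySem.Chars.upperChar x = PySem.Chars.upperChar cc ∧ x ∈ t
        · rw [if_pos hm, if_pos ⟨hm.1, List.mem_cons_of_mem _ hm.2⟩]
        · rw [if_neg hm, if_neg]
          intro ⟨h1, h2⟩
          rcases List.mem_cons.mp h2 with h3 | h3
          · exact h (h3 ▸ h1)
          · exact hm ⟨h1, h3⟩
      · have hb : (PySem.Chars.upperChar cw == PySem.Chars.upperChar cc) = false := by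
          simpa using h
        rw [hb]
        simp

-- the masked word once the guesses whose uppercases are collected in S have been processed
def pvMask (W0 : List Char) (S : List Char) : List Char :=
  W0.map (fun x => if PySem.Chars.upperChar x ∈ S then ' ' else x)

-- number of hits: distinct uppercased non-space guesses present in uw and not yet in S
def pvHits (uw : List Char) : List Char → List Char → Nat
  | [], _ => 0
  | cc :: rest, S =>
    if cc = ' ' then pvHits uw rest S
    else if PySem.Chars.upperChar cc ∈ uw ∧ PySem.Chars.upperChar cc ∉ S then
      1 + pvHits uw rest (PySem.Chars.upperChar cc :: S)
    else pvHits uw rest S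

lemma pv_any_mask (W0 S : List Char) (cc : Char) (hcc : cc ≠ ' ') :
    ((pvMask W0 S).any (fun cw => PySem.Chars.upperChar cw == PySem.Chars.upperChar cc)) = true
      ↔ (PySem.Chars.upperChar cc ∈ W0.map PySem.Chars.upperChar
          ∧ PySem.Chars.upperChar cc ∉ S) := by
  rw [List.any_eq_true]
  constructor
  · rintro ⟨x, hx, hb⟩
    rw [beq_iff_eq] at hb
    rcases List.mem_map.mp hx with ⟨w, hw, rfl⟩
    by_cases hs : PySem.Chars.upperChar w ∈ S
    · rw [if_pos hs] at hb
      have hsp : PySem.Chars.upperChar cc = ' ' := by rw [← hb]; rfl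
      exact absurd hsp (pv_upper_ne_space cc hcc)
    · rw [if_neg hs] at hb
      exact ⟨List.mem_map.mpr ⟨w, hw, hb⟩, hb ▸ hs⟩
  · rintro ⟨hin, hns⟩
    rcases List.mem_map.mp hin with ⟨w, hw, hb⟩
    refine ⟨w, ?_, ?_⟩
    · exact List.mem_map.mpr ⟨w, hw, by rw [if_neg (hb ▸ hns)]⟩
    · rw [beq_iff_eq]; exact hb

lemma pv_mask_step (W0 S : List Char) (cc : Char) :
    (pvMask W0 S).map (fun x => if PySem.Chars.upperChar x = PySem.Chars.upperChar cc then ' ' else x)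
      = pvMask W0 (PySem.Chars.upperChar cc :: S) := by
  unfold pvMask
  rw [List.map_map]
  apply List.map_congr_left
  intro w _
  simp only [Function.comp]
  by_cases hs : PySem.Chars.upperChar w ∈ S
  · rw [if_pos hs, if_pos (List.mem_cons.mpr (Or.inr hs))]
    split_ifs <;> rfl
  · rw [if_neg hs]
    by_cases hm : PySem.Chars.upperChar w = PySem.Chars.upperChar cc
    · rw [if_pos hm, if_pos (List.mem_cons.mpr (Or.inl hm))]
    · rw [if_neg hm, if_neg]
      intro hmem
      rcases List.mem_cons.mp hmem with h | h
      · exact hm h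
      · exact hs h

-- the outer loop invariant: counter = misses so far + (non-space guesses - distinct new hits) ahead
lemma pv_outer_fold (W0 : List Char) :
    ∀ (rest S : List Char) (k : Int),
      (rest.foldl pvOuterStep (k, String.ofList (pvMask W0 S))).1
        = k + ((rest.filter (fun c => c ≠ ' ')).length : Int)
            - (pvHits (W0.map PySem.Chars.upperChar) rest S : Int) := by
  intro rest
  induction rest with
  | nil => intro S k; simp [pvHits]
  | cons cc rest ih =>
    intro S k
    simp only [List.foldl_cons]
    by_cases hsp : cc = ' '
    · subst hsp
      rw [show pvOuterStep (k, String.ofList (pvMask W0 S)) ' ' = (k, String.ofList (pvMask W0 S)) from by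
        unfold pvOuterStep; simp]
      rw [ih S k]
      simp [pvHits]
    · have hmem : pvMask W0 S ≠ [] ∨ pvMask W0 S = [] := by
        by_cases h : pvMask W0 S = []
        · exact Or.inr h
        · exact Or.inl h
      have hstep : pvOuterStep (k, String.ofList (pvMask W0 S)) cc
          = (if (pvMask W0 S).any (fun cw => PySem.Chars.upperChar cw == PySem.Chars.upperChar cc) = false
               then k + 1 else k,
             String.ofList ((pvMask W0 S).map (fun x =>
               if PySem.Chars.upperChar x = PySem.Chars.upperChar cc ∧ x ∈ pvMask W0 S then ' ' else x))) := by
        unfold pvOuterStep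
        rw [if_pos hsp]
        simp only [String.toList_ofList]
        rw [pv_inner_fold cc hsp (pvMask W0 S) (pvMask W0 S) false hmem]
        simp only [Bool.false_or]
        split_ifs <;> rfl
      rw [hstep]
      by_cases hany : (pvMask W0 S).any (fun cw => PySem.Chars.upperChar cw == PySem.Chars.upperChar cc) = true
      · -- the guess hits: one distinct letter leaves the word, counter unchanged
        have hcond := (pv_any_mask W0 S cc hsp).mp hany
        have hword : (pvMask W0 S).map (fun x =>
              if PySem.Chars.upperChar x = PySem.Chars.upperChar cc ∧ x ∈ pvMask W0 S then ' ' else x)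
            = pvMask W0 (PySem.Chars.upperChar cc :: S) := by
          rw [← pv_mask_step W0 S cc]
          apply List.map_congr_left
          intro x hx
          by_cases hm : PySem.Chars.upperChar x = PySem.Chars.upperChar cc
          · rw [if_pos ⟨hm, hx⟩, if_pos hm]
          · rw [if_neg (fun hh => hm hh.1), if_neg hm]
        rw [hword, if_neg (by simp [hany]), ih (PySem.Chars.upperChar cc :: S) k]
        rw [show pvHits (W0.map PySem.Chars.upperChar) (cc :: rest) S
              = 1 + pvHits (W0.map PySem.Chars.upperChar) rest (PySem.Chars.upperChar cc :: S) from by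
          rw [pvHits]; rw [if_neg hsp, if_pos hcond]]
        rw [List.filter_cons, if_pos (by simpa using hsp)]
        simp only [List.length_cons]
        push_cast
        ring
      · -- the guess misses: counter increments, word unchanged
        have hanyf : (pvMask W0 S).any (fun cw => PySem.Chars.upperChar cw == PySem.Chars.upperChar cc) = false := by
          cases h : (pvMask W0 S).any (fun cw => PySem.Chars.upperChar cw == PySem.Chars.upperChar cc)
          · rfl
          · exact absurd h hany
        have hcond : ¬ (PySem.Chars.upperChar cc ∈ W0.map PySem.Chars.upperChar
            ∧ PySem.Chars.upperChar cc ∉ S) := fun hc => hany ((pv_any_mask W0 S cc hsp).mpr hc)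
        have hword : (pvMask W0 S).map (fun x =>
              if PySem.Chars.upperChar x = PySem.Chars.upperChar cc ∧ x ∈ pvMask W0 S then ' ' else x)
            = pvMask W0 S := by
          conv_rhs => rw [show pvMask W0 S = (pvMask W0 S).map id from (List.map_id _).symm]
          apply List.map_congr_left
          intro x hx
          rw [if_neg, id]
          intro ⟨h1, _⟩
          rw [List.any_eq_false] at hanyf
          exact absurd (by simpa using h1) (by simpa using hanyf x hx)
        rw [hword, if_pos hanyf, ih S (k + 1)]
        rw [show pvHits (W0.map PySem.Chars.upperChar) (cc :: rest) S
              = pvHits (W0.map PySem.Chars.upperChar) rest S from by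
          rw [pvHits]; rw [if_neg hsp, if_neg hcond]]
        rw [List.filter_cons, if_pos (by simpa using hsp)]
        simp only [List.length_cons]
        push_cast
        ring

-- pvHits as a Finset cardinality (so it is order-independent)
lemma pv_hits_card (uw : List Char) :
    ∀ (cs S : List Char),
      pvHits uw cs S
        = ((((cs.filter (fun c => c ≠ ' ')).map PySem.Chars.upperChar).toFinset.filter
             (fun c => c ∈ uw ∧ c ∉ S))).card := by
  intro cs
  induction cs with
  | nil => intro S; simp [pvHits]
  | cons cc rest ih =>
    intro S
    by_cases hsp : cc = ' '
    · subst hsp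
      rw [pvHits, if_pos rfl,
        show (' ' :: rest).filter (fun c => c ≠ ' ') = rest.filter (fun c => c ≠ ' ') from by simp]
      exact ih S
    · rw [pvHits, if_neg hsp,
        show (cc :: rest).filter (fun c => c ≠ ' ') = cc :: rest.filter (fun c => c ≠ ' ') from by
          simp [hsp]]
      simp only [List.map_cons, List.toFinset_cons]
      by_cases hcond : PySem.Chars.upperChar cc ∈ uw ∧ PySem.Chars.upperChar cc ∉ S
      · rw [if_pos hcond, Finset.filter_insert, if_pos hcond]
        set F := ((rest.filter (fun c => c ≠ ' ')).map PySem.Chars.upperChar).toFinset with hF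
        have herase : F.filter (fun c => c ∈ uw ∧ c ∉ PySem.Chars.upperChar cc :: S)
            = (F.filter (fun c => c ∈ uw ∧ c ∉ S)).erase (PySem.Chars.upperChar cc) := by
          ext x
          simp only [Finset.mem_filter, Finset.mem_erase, List.mem_cons]
          tauto
        rw [ih (PySem.Chars.upperChar cc :: S), herase]
        rw [show insert (PySem.Chars.upperChar cc) (F.filter (fun c => c ∈ uw ∧ c ∉ S))
              = insert (PySem.Chars.upperChar cc)
                  ((F.filter (fun c => c ∈ uw ∧ c ∉ S)).erase (PySem.Chars.upperChar cc)) from by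
          ext x
          simp only [Finset.mem_insert, Finset.mem_erase]
          constructor
          · rintro (h | h)
            · exact Or.inl h
            · by_cases hx : x = PySem.Chars.upperChar cc
              · exact Or.inl hx
              · exact Or.inr ⟨hx, h⟩
          · rintro (h | ⟨_, h⟩)
            · exact Or.inl h
            · exact Or.inr h]
        rw [Finset.card_insert_of_notMem (Finset.notMem_erase _ _)]
        omega
      · rw [if_neg hcond, Finset.filter_insert, if_neg hcond]
        exact ih S

-- B's intersection length as the same cardinality
lemma pv_inter_card (guesses uw : List Char) :
    (PySem.Set.inter (PySem.Set.ofList guesses) (PySem.Set.ofList uw)).length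
      = (guesses.toFinset.filter (fun c => c ∈ uw)).card := by
  have hnd : (PySem.Set.inter (PySem.Set.ofList guesses) (PySem.Set.ofList uw) : List Char).Nodup :=
    PySem.Set.nodup_inter _ _ (PySem.Set.nodup_ofList _)
  rw [← List.toFinset_card_of_nodup hnd]
  congr 1
  ext x
  simp only [List.mem_toFinset, Finset.mem_filter, PySem.Set.mem_inter,
    PySem.Set.mem_ofList]

-- ===== VERDICT (by name: the statement is the Claim_ definition above) =====
theorem getNbrErrors_spec : Claim_equal_getNbrErrors := by
  intro word chars _
  unfold Spec_getNbrErrors getNbrErrors getNbrErrors_alt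
  have h0 : String.ofList (pvMask word.toList []) = word := by
    simp [pvMask]
  conv_lhs => rw [← h0]
  rw [pv_outer_fold word.toList chars.toList [] 0]
  rw [pv_hits_card (word.toList.map PySem.Chars.upperChar) chars.toList []]
  show _ = ((((chars.toList.filter (fun c => c ≠ ' ')).map PySem.Chars.upperChar).length : Int)
    - ((PySem.Set.inter
        (PySem.Set.ofList ((chars.toList.filter (fun c => c ≠ ' ')).map PySem.Chars.upperChar))
        (PySem.Set.ofList (word.toList.map PySem.Chars.upperChar))).length : Int))
  rw [pv_inter_card]
  have hfc : (((chars.toList.filter (fun c => c ≠ ' ')).map PySem.Chars.upperChar).toFinset.filter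
        (fun c => c ∈ word.toList.map PySem.Chars.upperChar ∧ c ∉ ([] : List Char)))
      = (((chars.toList.filter (fun c => c ≠ ' ')).map PySem.Chars.upperChar).toFinset.filter
        (fun c => c ∈ word.toList.map PySem.Chars.upperChar)) := by
    apply Finset.filter_congr
    intro x _
    simp
  rw [hfc, List.length_map]
  ring
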